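-- pv_equiv track=rewrite | github.com/echoblue-98/echoworks-ai | aionos/improvement/shadow_runner.py | _diff_alerts
-- ===== SOURCE A (Python) =====
-- from typing import Dict, List, Optional, Any, Callable
--
-- def _diff_alerts(
--
--     baseline_alerts: List[Dict[str, Any]],
--     candidate_alerts: List[Dict[str, Any]],
-- ) -> Dict[str, int]:
--     """Compare two sets of alerts and count differences."""
--     def alert_key(a):
--         return (
--             a.get("user_id", ""),
--             a.get("alert_type", a.get("pattern", "")),
--             a.get("event_type", ""),
--         )
--
--     baseline_keys = {alert_key(a) for a in baseline_alerts}
--     candidate_keys = {alert_key(a) for a in candidate_alerts}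
--
--     new = candidate_keys - baseline_keys
--     removed = baseline_keys - candidate_keys
--     common = baseline_keys & candidate_keys
--
--     # Check severity changes in common alerts
--     severity_changed = 0
--     baseline_by_key = {alert_key(a): a for a in baseline_alerts}
--     candidate_by_key = {alert_key(a): a for a in candidate_alerts}
--     for key in common:
--         if key in baseline_by_key and key in candidate_by_key:
--             if baseline_by_key[key].get("severity") != candidate_by_key[key].get("severity"):
--                 severity_changed += 1
--
--     return {
--         "new": len(new),
--         "removed": len(removed),
--         "common": len(common),
--         "severity_changed": severity_changed,
--     }
-- ===== SOURCE B (Python) =====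
-- def _diff_alerts(baseline_alerts, candidate_alerts):
--     """Single merged-dict pass: populate per-key records, then classify each key once."""
--     def alert_key(a):
--         return (
--             a.get("user_id", ""),
--             a.get("alert_type", a.get("pattern", "")),
--             a.get("event_type", ""),
--         )
--
--     merged = {}
--     for a in baseline_alerts:
--         k = alert_key(a)
--         _, _, in_cand, cand_sev = merged.get(k, (False, None, False, None))
--         merged[k] = (True, a.get("severity"), in_cand, cand_sev)
--     for a in candidate_alerts:
--         k = alert_key(a)
--         in_base, base_sev, _, _ = merged.get(k, (False, None, False, None))
--         merged[k] = (in_base, base_sev, True, a.get("severity"))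
--
--     new = removed = common = severity_changed = 0
--     for in_base, base_sev, in_cand, cand_sev in merged.values():
--         if in_base and in_cand:
--             common += 1
--             if base_sev != cand_sev:
--                 severity_changed += 1
--         elif in_base:
--             removed += 1
--         else:
--             new += 1
--
--     return {
--         "new": new,
--         "removed": removed,
--         "common": common,
--         "severity_changed": severity_changed,
--     }
-- ===== Notes on version B (the rewrite author's own statement) =====
-- stated objective: alternative
-- what changed: Replaces key-sets with set algebra, two by-key dicts and a common-only severity loop by one merged dict of per-key (in_base, base_sev, in_cand, cand_sev) records populated in two passes and classified in a single final pass.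
import Mathlib
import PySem

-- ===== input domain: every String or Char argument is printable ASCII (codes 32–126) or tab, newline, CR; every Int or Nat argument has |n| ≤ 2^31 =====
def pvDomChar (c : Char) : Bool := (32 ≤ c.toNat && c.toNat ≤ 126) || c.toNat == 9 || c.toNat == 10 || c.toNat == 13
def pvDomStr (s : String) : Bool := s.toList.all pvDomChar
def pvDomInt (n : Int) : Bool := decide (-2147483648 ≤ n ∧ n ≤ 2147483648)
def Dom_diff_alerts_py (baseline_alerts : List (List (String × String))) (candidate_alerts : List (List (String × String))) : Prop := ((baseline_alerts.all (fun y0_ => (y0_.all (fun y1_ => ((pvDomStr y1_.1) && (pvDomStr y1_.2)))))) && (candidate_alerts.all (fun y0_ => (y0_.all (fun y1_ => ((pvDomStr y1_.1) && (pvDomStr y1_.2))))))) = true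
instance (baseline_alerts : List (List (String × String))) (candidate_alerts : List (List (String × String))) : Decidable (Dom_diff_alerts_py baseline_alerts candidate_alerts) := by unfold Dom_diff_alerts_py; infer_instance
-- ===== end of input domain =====

-- B replaces A's set algebra, two by-key dicts and common-only severity loop by a single merged
-- dict of per-key (in_base, base_sev, in_cand, cand_sev) records classified in one final pass.


-- ===== PORT A =====
-- a.get(key, default) / a.get(key) on an alert dict = first-match association-list lookup
def pvAlertKey (a : List (String × String)) : String × String × String :=
  ((a.lookup "user_id").getD "",
   (a.lookup "alert_type").getD ((a.lookup "pattern").getD ""),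
   (a.lookup "event_type").getD "")

def diff_alerts_py (baseline_alerts : List (List (String × String))) (candidate_alerts : List (List (String × String))) : List (String × Int) :=
  let baseline_keys : PySem.Set (String × String × String) :=
    PySem.Set.ofList (baseline_alerts.map pvAlertKey)
  let candidate_keys : PySem.Set (String × String × String) :=
    PySem.Set.ofList (candidate_alerts.map pvAlertKey)
  let newKeys := PySem.Set.diff candidate_keys baseline_keys
  let removedKeys := PySem.Set.diff baseline_keys candidate_keys
  let commonKeys := PySem.Set.inter baseline_keys candidate_keys
  let baseline_by_key : PySem.Dict (String × String × String) (List (String × String)) :=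
    baseline_alerts.foldl (fun d a => d.insert (pvAlertKey a) a) PySem.Dict.empty
  let candidate_by_key : PySem.Dict (String × String × String) (List (String × String)) :=
    candidate_alerts.foldl (fun d a => d.insert (pvAlertKey a) a) PySem.Dict.empty
  -- the loop over the set 'common' only accumulates a count, so it is order-independent;
  -- baseline_by_key[key] is read with getD under the contains-guard that Python checks first
  let severity_changed : Int := commonKeys.foldl (fun n k =>
    if baseline_by_key.contains k && candidate_by_key.contains k then
      if ((baseline_by_key.getD k []).lookup "severity") ≠ ((candidate_by_key.getD k []).lookup "severity")
      then n + 1 else n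
    else n) 0
  [("new", (newKeys.length : Int)), ("removed", (removedKeys.length : Int)),
   ("common", (commonKeys.length : Int)), ("severity_changed", severity_changed)]

-- ===== PORT B =====
-- record per key: (in_base, base_sev, in_cand, cand_sev)
def diff_alerts_py_alt (baseline_alerts : List (List (String × String))) (candidate_alerts : List (List (String × String))) : List (String × Int) :=
  let m1 : PySem.Dict (String × String × String) (Bool × Option String × Bool × Option String) :=
    baseline_alerts.foldl (fun d a =>
      d.insert (pvAlertKey a)
        (true, a.lookup "severity",
         (d.getD (pvAlertKey a) (false, none, false, none)).2.2.1,
         (d.getD (pvAlertKey a) (false, none, false, none)).2.2.2)) PySem.Dict.empty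
  let merged : PySem.Dict (String × String × String) (Bool × Option String × Bool × Option String) :=
    candidate_alerts.foldl (fun d a =>
      d.insert (pvAlertKey a)
        ((d.getD (pvAlertKey a) (false, none, false, none)).1,
         (d.getD (pvAlertKey a) (false, none, false, none)).2.1,
         true, a.lookup "severity")) m1
  let counts : Int × Int × Int × Int := merged.values.foldl (fun acc v =>
    if v.1 && v.2.2.1 then
      (acc.1, acc.2.1, acc.2.2.1 + 1, if v.2.1 ≠ v.2.2.2 then acc.2.2.2 + 1 else acc.2.2.2)
    else if v.1 then (acc.1, acc.2.1 + 1, acc.2.2.1, acc.2.2.2)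
    else (acc.1 + 1, acc.2.1, acc.2.2.1, acc.2.2.2)) (0, 0, 0, 0)
  [("new", counts.1), ("removed", counts.2.1),
   ("common", counts.2.2.1), ("severity_changed", counts.2.2.2)]

-- ===== PRECONDITION & SPEC =====
def Spec_diff_alerts_py (baseline_alerts : List (List (String × String))) (candidate_alerts : List (List (String × String))) (out : List (String × Int)) : Prop := out = diff_alerts_py_alt baseline_alerts candidate_alerts
instance (baseline_alerts : List (List (String × String))) (candidate_alerts : List (List (String × String))) (out : List (String × Int)) : Decidable (Spec_diff_alerts_py baseline_alerts candidate_alerts out) := by unfold Spec_diff_alerts_py; infer_instance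

-- ===== CLAIM (what is proved, stated in full; the proofs are below) =====
def Claim_equal_diff_alerts_py : Prop := ∀ (baseline_alerts : List (List (String × String))) (candidate_alerts : List (List (String × String))), Dom_diff_alerts_py baseline_alerts candidate_alerts → Spec_diff_alerts_py baseline_alerts candidate_alerts (diff_alerts_py baseline_alerts candidate_alerts)

-- ===== LEMMAS AND PROOFS =====
-- proof-side helpers
def pvLast (l : List (List (String × String))) (k : String × String × String) :
    Option (List (String × String)) :=
  l.reverse.find? (fun a => pvAlertKey a == k)
def pvSev (l : List (List (String × String))) (k : String × String × String) : Option String :=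
  ((pvLast l k).getD []).lookup "severity"


lemma pvLast_append (l : List (List (String × String))) (a : List (String × String)) (k) :
    pvLast (a :: l) k = (pvLast l k).or (if pvAlertKey a = k then some a else none) := by
  simp only [pvLast, List.reverse_cons, List.find?_append]
  by_cases h : pvAlertKey a = k
  · simp [h, List.find?]
  · have hb : (pvAlertKey a == k) = false := by simp [h]
    simp [List.find?, hb, h, Option.or_none]

lemma pvLast_eq_none_iff (l : List (List (String × String))) (k) :
    pvLast l k = none ↔ k ∉ l.map pvAlertKey := by
  simp only [pvLast]
  rw [List.find?_eq_none]
  simp only [List.mem_reverse, beq_iff_eq, List.mem_map, not_exists]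
  aesop

set_option maxRecDepth 4096 in
lemma L1 (l : List (List (String × String)))
    (d : PySem.Dict (String × String × String) (List (String × String))) (k) :
    (l.foldl (fun d a => d.insert (pvAlertKey a) a) d).get? k
      = ((pvLast l k).or (d.get? k)) := by
  induction l generalizing d with
  | nil => simp only [List.foldl_nil, pvLast, List.reverse_nil, List.find?_nil, Option.none_or]
  | cons a t ih =>
      simp only [List.foldl_cons, ih, pvLast_append]
      rw [Option.or_assoc]
      congr 1
      rw [PySem.Dict.get?_insert]
      by_cases h : pvAlertKey a = k
      · simp [h, Option.or]
      · have h2 : k ≠ pvAlertKey a := fun hh => h hh.symm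
        simp [h, h2, Option.or]

def pvBase (d : PySem.Dict (String × String × String) (Bool × Option String × Bool × Option String))
    (k : String × String × String) : Bool × Option String :=
  match d.get? k with
  | some v => (v.1, v.2.1)
  | none => (false, none)

lemma L2 (l : List (List (String × String)))
    (d : PySem.Dict (String × String × String) (Bool × Option String × Bool × Option String)) (k)
    (Hd : ∀ k v, d.get? k = some v → v.2.2 = ((false : Bool), (none : Option String))) :
    (l.foldl (fun d a =>
      d.insert (pvAlertKey a)
        (true, a.lookup "severity",
         (d.getD (pvAlertKey a) (false, none, false, none)).2.2.1,
         (d.getD (pvAlertKey a) (false, none, false, none)).2.2.2)) d).get? k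
      = ((pvLast l k).map (fun a => (true, a.lookup "severity", false, none))).or (d.get? k) := by
  induction l generalizing d with
  | nil => simp only [List.foldl_nil, pvLast, List.reverse_nil, List.find?_nil, Option.map_none,
      Option.none_or]
  | cons a t ih =>
      have h22 : ((d.getD (pvAlertKey a) (false, none, false, none)).2.2.1,
          (d.getD (pvAlertKey a) (false, none, false, none)).2.2.2)
            = ((false : Bool), (none : Option String)) := by
        rw [PySem.Dict.getD_eq_get?_getD]
        rcases h : d.get? (pvAlertKey a) with _ | v
        · rfl
        · have hv := Hd _ _ h
          simp only [Option.getD_some]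
          rw [Prod.mk.injEq]
          exact ⟨congrArg Prod.fst hv, congrArg Prod.snd hv⟩
      have h1 : (d.getD (pvAlertKey a) (false, none, false, none)).2.2.1 = false :=
        congrArg Prod.fst h22
      have h2 : (d.getD (pvAlertKey a) (false, none, false, none)).2.2.2 = (none : Option String) :=
        congrArg Prod.snd h22
      simp only [List.foldl_cons, h1, h2]
      rw [ih]
      · rw [pvLast_append]
        rcases hf : pvLast t k with _ | b
        · simp only [Option.map_none, Option.none_or]
          rw [PySem.Dict.get?_insert]
          by_cases h : pvAlertKey a = k
          · simp [h, Option.or]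
          · have h' : k ≠ pvAlertKey a := fun hh => h hh.symm
            simp [h, h', Option.or]
        · simp [Option.or]
      · intro k' v' hv
        rw [PySem.Dict.get?_insert] at hv
        split_ifs at hv with hk
        · cases hv; rfl
        · exact Hd _ _ hv

lemma L3 (l : List (List (String × String)))
    (d : PySem.Dict (String × String × String) (Bool × Option String × Bool × Option String)) (k) :
    (l.foldl (fun d a =>
      d.insert (pvAlertKey a)
        ((d.getD (pvAlertKey a) (false, none, false, none)).1,
         (d.getD (pvAlertKey a) (false, none, false, none)).2.1,
         true, a.lookup "severity")) d).get? k
      = ((pvLast l k).map (fun a => ((pvBase d k).1, (pvBase d k).2, true, a.lookup "severity"))).or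
          (d.get? k) := by
  induction l generalizing d with
  | nil => simp only [List.foldl_nil, pvLast, List.reverse_nil, List.find?_nil, Option.map_none,
      Option.none_or]
  | cons a t ih =>
      simp only [List.foldl_cons]
      rw [ih, pvLast_append]
      have hbase : pvBase (d.insert (pvAlertKey a)
          ((d.getD (pvAlertKey a) (false, none, false, none)).1,
           (d.getD (pvAlertKey a) (false, none, false, none)).2.1,
           true, a.lookup "severity")) k = pvBase d k := by
        unfold pvBase
        rw [PySem.Dict.get?_insert]
        split_ifs with h
        · rw [h, PySem.Dict.getD_eq_get?_getD]
          rcases hg : d.get? (pvAlertKey a) with _ | v <;> simp [Option.getD]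
        · rfl
      rw [hbase]
      rcases hf : pvLast t k with _ | b
      · simp only [Option.map_none, Option.none_or]
        rw [PySem.Dict.get?_insert]
        by_cases h : pvAlertKey a = k
        · rw [if_pos h.symm, if_pos h]
          subst h
          simp only [Option.or]
          unfold pvBase
          rw [PySem.Dict.getD_eq_get?_getD]
          rcases hg : d.get? (pvAlertKey a) with _ | v <;> simp [Option.getD]
        · have h' : k ≠ pvAlertKey a := fun hh => h hh.symm
          simp [h, h', Option.or]
      · simp [Option.or]

lemma L4 (vs : List (Bool × Option String × Bool × Option String)) (acc : Int × Int × Int × Int) :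
    vs.foldl (fun acc v =>
      if v.1 && v.2.2.1 then
        (acc.1, acc.2.1, acc.2.2.1 + 1, if v.2.1 ≠ v.2.2.2 then acc.2.2.2 + 1 else acc.2.2.2)
      else if v.1 then (acc.1, acc.2.1 + 1, acc.2.2.1, acc.2.2.2)
      else (acc.1 + 1, acc.2.1, acc.2.2.1, acc.2.2.2)) acc
      = (acc.1 + vs.countP (fun v => !v.1),
         acc.2.1 + vs.countP (fun v => v.1 && !v.2.2.1),
         acc.2.2.1 + vs.countP (fun v => v.1 && v.2.2.1),
         acc.2.2.2 + vs.countP (fun v => v.1 && v.2.2.1 && decide (v.2.1 ≠ v.2.2.2))) := by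
  induction vs generalizing acc with
  | nil => simp
  | cons v t ih =>
      simp only [List.foldl_cons, ih, List.countP_cons]
      by_cases h1 : v.1 <;> by_cases h2 : v.2.2.1 <;> by_cases h3 : v.2.1 ≠ v.2.2.2 <;>
        simp [h1, h2, h3, Prod.ext_iff] <;> omega

lemma L5 {α : Type} [DecidableEq α] {l₁ l₂ : List α} {p q : α → Bool}
    (h₁ : l₁.Nodup) (h₂ : l₂.Nodup)
    (h : ∀ x, (x ∈ l₁ ∧ p x = true) ↔ (x ∈ l₂ ∧ q x = true)) :
    l₁.countP p = l₂.countP q := by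
  rw [List.countP_eq_length_filter, List.countP_eq_length_filter]
  exact List.Perm.length_eq (by
    rw [List.perm_ext_iff_of_nodup (h₁.filter p) (h₂.filter q)]
    intro x
    simp only [List.mem_filter]
    exact h x)

def pvVal (b c : List (List (String × String))) (k : String × String × String) :
    Bool × Option String × Bool × Option String :=
  (decide (k ∈ b.map pvAlertKey),
   if k ∈ b.map pvAlertKey then pvSev b k else none,
   decide (k ∈ c.map pvAlertKey),
   if k ∈ c.map pvAlertKey then pvSev c k else none)

lemma pvLast_mem (l : List (List (String × String))) (k) (h : k ∈ l.map pvAlertKey) :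
    ∃ a, pvLast l k = some a ∧ a.lookup "severity" = pvSev l k := by
  rcases hf : pvLast l k with _ | a
  · exact absurd ((pvLast_eq_none_iff l k).mp hf) (by simpa using h)
  · exact ⟨a, rfl, by simp [pvSev, hf]⟩

lemma Lmerged (b c : List (List (String × String))) (k)
    (h : k ∈ b.map pvAlertKey ∨ k ∈ c.map pvAlertKey) :
    (c.foldl (fun d a =>
      d.insert (pvAlertKey a)
        ((d.getD (pvAlertKey a) (false, none, false, none)).1,
         (d.getD (pvAlertKey a) (false, none, false, none)).2.1,
         true, a.lookup "severity"))
      (b.foldl (fun d a =>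
        d.insert (pvAlertKey a)
          (true, a.lookup "severity",
           (d.getD (pvAlertKey a) (false, none, false, none)).2.2.1,
           (d.getD (pvAlertKey a) (false, none, false, none)).2.2.2)) PySem.Dict.empty)).get? k
      = some (pvVal b c k) := by
  have hm1 : (b.foldl (fun (d : PySem.Dict (String × String × String)
        (Bool × Option String × Bool × Option String)) a =>
      d.insert (pvAlertKey a)
        (true, a.lookup "severity",
         (d.getD (pvAlertKey a) (false, none, false, none)).2.2.1,
         (d.getD (pvAlertKey a) (false, none, false, none)).2.2.2)) PySem.Dict.empty).get? k
      = (pvLast b k).map (fun a => (true, a.lookup "severity", false, none)) := by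
    rw [L2]
    · simp [PySem.Dict.get?_empty]
    · intro k v hv
      simp [PySem.Dict.get?_empty] at hv
  rw [L3]
  have hbase : pvBase (b.foldl (fun (d : PySem.Dict (String × String × String)
        (Bool × Option String × Bool × Option String)) a =>
      d.insert (pvAlertKey a)
        (true, a.lookup "severity",
         (d.getD (pvAlertKey a) (false, none, false, none)).2.2.1,
         (d.getD (pvAlertKey a) (false, none, false, none)).2.2.2)) PySem.Dict.empty) k
      = (decide (k ∈ b.map pvAlertKey), if k ∈ b.map pvAlertKey then pvSev b k else none) := by
    unfold pvBase
    rw [hm1]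
    by_cases hb : k ∈ b.map pvAlertKey
    · obtain ⟨a, ha, hs⟩ := pvLast_mem b k hb
      rw [ha]
      simp [hb, hs]
    · rw [(pvLast_eq_none_iff b k).mpr hb]
      simp [hb]
  by_cases hc : k ∈ c.map pvAlertKey
  · obtain ⟨a, ha, hs⟩ := pvLast_mem c k hc
    rw [ha, hbase]
    simp [Option.or, pvVal, hc, hs]
  · rw [(pvLast_eq_none_iff c k).mpr hc]
    have hb : k ∈ b.map pvAlertKey := h.resolve_right hc
    simp only [Option.map_none, Option.none_or]
    rw [hm1]
    obtain ⟨a, ha, hs⟩ := pvLast_mem b k hb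
    rw [ha]
    simp [pvVal, hb, hc, hs]

def pvUK (b c : List (List (String × String))) : List (String × String × String) :=
  PySem.Set.update (PySem.Set.ofList (b.map pvAlertKey)) (c.map pvAlertKey)

lemma pvUK_nodup (b c : List (List (String × String))) : (pvUK b c).Nodup :=
  PySem.Set.nodup_update _ _ (PySem.Set.nodup_ofList _)

lemma pvUK_mem (b c : List (List (String × String))) (x) :
    x ∈ pvUK b c ↔ x ∈ b.map pvAlertKey ∨ x ∈ c.map pvAlertKey := by
  simp [pvUK, PySem.Set.mem_update, PySem.Set.mem_ofList]

set_option maxHeartbeats 1000000 in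
lemma Cnew (b c : List (List (String × String))) :
    (PySem.Set.diff (PySem.Set.ofList (c.map pvAlertKey))
       (PySem.Set.ofList (b.map pvAlertKey))).length
      = (pvUK b c).countP (fun k => !(pvVal b c k).1) := by
  rw [← List.countP_true]
  refine L5 (PySem.Set.nodup_diff _ _ (PySem.Set.nodup_ofList _)) (pvUK_nodup b c) (fun x => ?_)
  by_cases hb : x ∈ b.map pvAlertKey <;> by_cases hc : x ∈ c.map pvAlertKey <;>
    simp [PySem.Set.mem_diff, PySem.Set.mem_ofList, pvUK_mem, pvVal, hb, hc]

set_option maxHeartbeats 1000000 in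
lemma Crem (b c : List (List (String × String))) :
    (PySem.Set.diff (PySem.Set.ofList (b.map pvAlertKey))
       (PySem.Set.ofList (c.map pvAlertKey))).length
      = (pvUK b c).countP (fun k => (pvVal b c k).1 && !(pvVal b c k).2.2.1) := by
  rw [← List.countP_true]
  refine L5 (PySem.Set.nodup_diff _ _ (PySem.Set.nodup_ofList _)) (pvUK_nodup b c) (fun x => ?_)
  by_cases hb : x ∈ b.map pvAlertKey <;> by_cases hc : x ∈ c.map pvAlertKey <;>
    simp [PySem.Set.mem_diff, PySem.Set.mem_ofList, pvUK_mem, pvVal, hb, hc]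

set_option maxHeartbeats 1000000 in
lemma Ccom (b c : List (List (String × String))) :
    (PySem.Set.inter (PySem.Set.ofList (b.map pvAlertKey))
       (PySem.Set.ofList (c.map pvAlertKey))).length
      = (pvUK b c).countP (fun k => (pvVal b c k).1 && (pvVal b c k).2.2.1) := by
  rw [← List.countP_true]
  refine L5 (PySem.Set.nodup_inter _ _ (PySem.Set.nodup_ofList _)) (pvUK_nodup b c) (fun x => ?_)
  by_cases hb : x ∈ b.map pvAlertKey <;> by_cases hc : x ∈ c.map pvAlertKey <;>
    simp [PySem.Set.mem_inter, PySem.Set.mem_ofList, pvUK_mem, pvVal, hb, hc]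

set_option maxHeartbeats 1000000 in
lemma Csev (b c : List (List (String × String))) :
    (PySem.Set.inter (PySem.Set.ofList (b.map pvAlertKey))
       (PySem.Set.ofList (c.map pvAlertKey))).foldl
      (fun n k =>
        if (b.foldl (fun d a => d.insert (pvAlertKey a) a) PySem.Dict.empty).contains k &&
           (c.foldl (fun d a => d.insert (pvAlertKey a) a) PySem.Dict.empty).contains k then
          if ((b.foldl (fun d a => d.insert (pvAlertKey a) a) PySem.Dict.empty).getD k []).lookup "severity"
             ≠ ((c.foldl (fun d a => d.insert (pvAlertKey a) a) PySem.Dict.empty).getD k []).lookup "severity"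
          then n + 1 else n
        else n) (0 : Int)
    = ((pvUK b c).countP (fun k => (pvVal b c k).1 && (pvVal b c k).2.2.1 &&
        decide ((pvVal b c k).2.1 ≠ (pvVal b c k).2.2.2)) : Int) := by
  refine Eq.trans (PySem.List.foldl_congr_mem
    (g := fun (n : Int) k => if pvSev b k ≠ pvSev c k then n + 1 else n) _ _ _ ?_) ?_
  · intro acc x hx
    have hxb : x ∈ b.map pvAlertKey := by
      have h2 := (PySem.Set.mem_inter _ _ _).mp hx
      simpa [PySem.Set.mem_ofList] using h2.1
    have hxc : x ∈ c.map pvAlertKey := by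
      have h2 := (PySem.Set.mem_inter _ _ _).mp hx
      simpa [PySem.Set.mem_ofList] using h2.2
    obtain ⟨ab, hab, hsb⟩ := pvLast_mem b x hxb
    obtain ⟨ac, hac, hsc⟩ := pvLast_mem c x hxc
    have hgb : (b.foldl (fun d a => d.insert (pvAlertKey a) a) PySem.Dict.empty).get? x
        = some ab := by rw [L1, hab]; rfl
    have hgc : (c.foldl (fun d a => d.insert (pvAlertKey a) a) PySem.Dict.empty).get? x
        = some ac := by rw [L1, hac]; rfl
    rw [PySem.Dict.contains_eq_isSome_get?, PySem.Dict.contains_eq_isSome_get?, hgb, hgc,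
      PySem.Dict.getD_eq_get?_getD, PySem.Dict.getD_eq_get?_getD, hgb, hgc]
    simp [hsb, hsc]
  · rw [PySem.List.foldl_ite_add_one, zero_add]
    congr 1
    refine L5 (PySem.Set.nodup_inter _ _ (PySem.Set.nodup_ofList _)) (pvUK_nodup b c) (fun x => ?_)
    by_cases hb : x ∈ b.map pvAlertKey <;> by_cases hc : x ∈ c.map pvAlertKey <;>
      simp [PySem.Set.mem_inter, PySem.Set.mem_ofList, pvUK_mem, pvVal, hb, hc]

set_option maxHeartbeats 1000000 in
theorem pvMain (b c : List (List (String × String))) :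
    diff_alerts_py b c = diff_alerts_py_alt b c := by
  simp only [diff_alerts_py, diff_alerts_py_alt]
  rw [L4]
  have hkeys : (c.foldl (fun d a =>
      d.insert (pvAlertKey a)
        ((d.getD (pvAlertKey a) (false, none, false, none)).1,
         (d.getD (pvAlertKey a) (false, none, false, none)).2.1,
         true, a.lookup "severity"))
      (b.foldl (fun d a =>
        d.insert (pvAlertKey a)
          (true, a.lookup "severity",
           (d.getD (pvAlertKey a) (false, none, false, none)).2.2.1,
           (d.getD (pvAlertKey a) (false, none, false, none)).2.2.2)) PySem.Dict.empty)).keys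
      = pvUK b c := by
    rw [PySem.Dict.keys_foldl_insert_key, PySem.Dict.keys_foldl_insert_key, PySem.Dict.keys_empty]
    simp [pvUK, PySem.Set.update_nil_left]
  have hnd := hkeys ▸ pvUK_nodup b c
  rw [PySem.Dict.values_eq_map_keys _ hnd ((false, none, false, none) :
      Bool × Option String × Bool × Option String), hkeys]
  have hvals : (pvUK b c).map (fun k => (c.foldl (fun d a =>
      d.insert (pvAlertKey a)
        ((d.getD (pvAlertKey a) (false, none, false, none)).1,
         (d.getD (pvAlertKey a) (false, none, false, none)).2.1,
         true, a.lookup "severity"))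
      (b.foldl (fun d a =>
        d.insert (pvAlertKey a)
          (true, a.lookup "severity",
           (d.getD (pvAlertKey a) (false, none, false, none)).2.2.1,
           (d.getD (pvAlertKey a) (false, none, false, none)).2.2.2)) PySem.Dict.empty)).getD k
        (false, none, false, none))
      = (pvUK b c).map (fun k => pvVal b c k) := by
    refine List.map_congr_left (fun k hk => ?_)
    rw [PySem.Dict.getD_eq_get?_getD, Lmerged b c k ((pvUK_mem b c k).mp hk)]
    rfl
  rw [hvals, List.countP_map, List.countP_map, List.countP_map, List.countP_map]
  rw [Cnew b c, Crem b c, Ccom b c, Csev b c]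
  simp only [Function.comp_def]
  simp

-- ===== VERDICT (by name: the statement is the Claim_ definition above) =====
theorem diff_alerts_py_spec : Claim_equal_diff_alerts_py := by
  intro baseline_alerts candidate_alerts _
  unfold Spec_diff_alerts_py
  exact pvMain baseline_alerts candidate_alerts
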